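-- pv_equiv track=rewrite | github.com/Thernn88/SAPPHYRE | sapphyre/miniprot_module.py | generate_sequence
-- ===== SOURCE A (Python) =====
-- def generate_sequence(ids, head_to_seq):
--     ids_to_coords = {}
--     prev_og = head_to_seq[ids[0]]
--     start, end = 0, len(prev_og)
--     ids_to_coords[ids[0]] = (start, end)
--     for i, child in enumerate(ids):
--         if i == 0:
--             continue
--         prev_og += head_to_seq[child][250:]
--         start = end - 250
--         end = len(prev_og)
--         ids_to_coords[child] = (start, end)
--
--     return ids_to_coords, prev_og
-- ===== SOURCE B (Python) =====
-- def generate_sequence(ids, head_to_seq):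
--     # Staged computation: segment list, cumulative ends, shifted starts,
--     # then the coordinate dict is built in one go from zips.
--     segments = [head_to_seq[c][250:] if i else head_to_seq[c] for i, c in enumerate(ids)]
--     ends, total = [], 0
--     for seg in segments:
--         total += len(seg)
--         ends.append(total)
--     starts = [0] + [e - 250 for e in ends[:-1]]
--     return dict(zip(ids, zip(starts, ends))), "".join(segments)
-- ===== Notes on version B (the rewrite author's own statement) =====
-- stated objective: alternative
-- what changed: B replaces A's single loop that mutates an accumulating string and reads its length each iteration with a staged pipeline: a segment list, a cumulative-ends list, a shifted starts list, and the dict built once from zips, with a single join for the sequence.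
import Mathlib
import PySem

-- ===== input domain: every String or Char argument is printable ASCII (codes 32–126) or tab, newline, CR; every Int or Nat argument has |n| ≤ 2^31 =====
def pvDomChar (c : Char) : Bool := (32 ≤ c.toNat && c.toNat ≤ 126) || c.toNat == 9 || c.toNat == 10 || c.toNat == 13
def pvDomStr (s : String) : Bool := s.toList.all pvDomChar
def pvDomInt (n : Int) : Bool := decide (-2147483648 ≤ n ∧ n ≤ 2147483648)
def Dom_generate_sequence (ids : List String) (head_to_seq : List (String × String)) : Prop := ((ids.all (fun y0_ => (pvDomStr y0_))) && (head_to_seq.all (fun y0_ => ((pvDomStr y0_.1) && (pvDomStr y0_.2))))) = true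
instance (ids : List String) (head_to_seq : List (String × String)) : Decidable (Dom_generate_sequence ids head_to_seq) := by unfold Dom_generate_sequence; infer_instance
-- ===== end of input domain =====

-- B re-implements generate_sequence as a staged pipeline (segment list, cumulative ends,
-- shifted starts, dict built from zips, one join) instead of A's single accumulating loop;
-- objective: alternative decomposition, same cost.


-- ===== PORT A =====
-- dict lookup head_to_seq[k] (first match on the association list); none = KeyError
def pvLookup (head_to_seq : List (String × String)) (k : String) : Option String :=
  (PySem.Dict.mk head_to_seq).get? k

-- head_to_seq[c][250:] (KeyError → getD "", excluded by Pre_generate_sequence)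
def pvSeg (head_to_seq : List (String × String)) (c : String) : String :=
  PySem.Str.slice ((pvLookup head_to_seq c).getD "") (some 250) none

-- A's for-loop over enumerate(ids); state = (ids_to_coords, prev_og, start, end).
def pvALoop (head_to_seq : List (String × String)) :
    List (Int × String) → PySem.Dict String (Int × Int) × String × Int × Int →
    PySem.Dict String (Int × Int) × String × Int × Int
  | [], st => st
  | (i, child) :: rest, (d, prev, s, e) =>
      if i == 0 then pvALoop head_to_seq rest (d, prev, s, e)
      else
        let prev' := prev ++ pvSeg head_to_seq child
        let s' := e - 250
        let e' := PySem.Str.len prev'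
        pvALoop head_to_seq rest (PySem.Dict.insert d child (s', e'), prev', s', e')

def generate_sequence (ids : List String) (head_to_seq : List (String × String)) : (List (String × Int × Int)) × String :=
  match ids with
  | [] => ([], "")          -- ids[0] raises IndexError: excluded by Pre_generate_sequence
  | id0 :: _ =>
    match pvLookup head_to_seq id0 with
    | none => ([], "")      -- KeyError: excluded by Pre_generate_sequence
    | some prev_og =>
      let e : Int := PySem.Str.len prev_og
      let d := PySem.Dict.insert (PySem.Dict.mk []) id0 (0, e)
      let st := pvALoop head_to_seq (PySem.List.enumerate ids 0) (d, prev_og, 0, e)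
      (st.1.items, st.2.1)

-- ===== PORT B =====
-- cumulative ends: running total of segment lengths (Source B's 'ends' loop)
def pvEnds : List String → Int → List Int
  | [], _ => []
  | seg :: rest, total => (total + PySem.Str.len seg) :: pvEnds rest (total + PySem.Str.len seg)

def generate_sequence_alt (ids : List String) (head_to_seq : List (String × String)) : (List (String × Int × Int)) × String :=
  -- segments = [head_to_seq[c][250:] if i else head_to_seq[c] for i, c in enumerate(ids)]
  let segments := (PySem.List.enumerate ids 0).map (fun ic =>
    let s := ((PySem.Dict.mk head_to_seq).get? ic.2).getD ""   -- KeyError excluded by Pre_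
    if ic.1 == 0 then s else PySem.Str.slice s (some 250) none)
  let ends := pvEnds segments 0
  let starts := 0 :: (ends.dropLast.map (fun e => e - 250))
  let coords := (ids.zip (starts.zip ends)).foldl
    (fun d p => PySem.Dict.insert d p.1 p.2) (PySem.Dict.mk [])
  (coords.items, PySem.Str.join "" segments)

-- ===== PRECONDITION & SPEC =====
-- Pre_ excludes exactly the inputs where Python A raises: empty ids (IndexError) and
-- any id missing from head_to_seq (KeyError).
def Pre_generate_sequence (ids : List String) (head_to_seq : List (String × String)) : Prop :=
  ids ≠ [] ∧ ∀ c ∈ ids, ((PySem.Dict.mk head_to_seq).get? c).isSome = true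
instance (ids : List String) (head_to_seq : List (String × String)) : Decidable (Pre_generate_sequence ids head_to_seq) := by unfold Pre_generate_sequence; infer_instance

def pvWitness_generate_sequence : List String × (List (String × String)) :=
  (["a", "b"], [("a", "xy"), ("b", "z")])

def Spec_generate_sequence (ids : List String) (head_to_seq : List (String × String)) (out : (List (String × Int × Int)) × String) : Prop := out = generate_sequence_alt ids head_to_seq
instance (ids : List String) (head_to_seq : List (String × String)) (out : (List (String × Int × Int)) × String) : Decidable (Spec_generate_sequence ids head_to_seq out) := by unfold Spec_generate_sequence; infer_instance

-- ===== CLAIM (what is proved, stated in full; the proofs are below) =====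
def Claim_equal_generate_sequence : Prop := ∀ (ids : List String) (head_to_seq : List (String × String)), Dom_generate_sequence ids head_to_seq → Pre_generate_sequence ids head_to_seq → Spec_generate_sequence ids head_to_seq (generate_sequence ids head_to_seq)

-- ===== LEMMAS AND PROOFS =====
theorem pv_flat_int : ∀ (l : List (List Char)), (List.intersperse ([]:List Char) l).flatten = l.flatten
  | [] => rfl
  | [a] => by simp
  | a :: b :: l => by
      rw [List.intersperse_cons₂, List.flatten_cons, List.flatten_cons, pv_flat_int (b :: l)]
      simp

theorem pv_join_nil : PySem.Str.join "" [] = "" := by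
  apply String.toList_injective
  simp [PySem.Str.toList_join, PySem.Chars.join, List.intercalate]

theorem pv_join_cons (x : String) (l : List String) :
    PySem.Str.join "" (x :: l) = x ++ PySem.Str.join "" l := by
  apply String.toList_injective
  simp [PySem.Str.toList_join, PySem.Chars.join, List.intercalate, pv_flat_int]

-- the per-index coordinate triples of the tail, from a running end
def pvPairs : List String → List String → Int → List (String × (Int × Int))
  | c :: cs, seg :: segs, e => (c, (e - 250, e + PySem.Str.len seg)) :: pvPairs cs segs (e + PySem.Str.len seg)
  | _, _, _ => []

-- B's segments comprehension over the tail of enumerate reduces to mapping pvSeg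
theorem pv_map_enum (h : List (String × String)) :
    ∀ (rest : List String) (n : Int), 0 < n →
      (PySem.List.enumerate rest n).map (fun ic =>
        let s := ((PySem.Dict.mk h).get? ic.2).getD ""
        if ic.1 == 0 then s else PySem.Str.slice s (some 250) none)
        = rest.map (pvSeg h)
  | [], n, hn => by simp [PySem.List.enumerate]
  | c :: rest, n, hn => by
      rw [PySem.List.enumerate_cons]
      have hne : (n == 0) = false := by simp; omega
      simp only [List.map_cons, hne, Bool.false_eq_true, if_false]
      rw [pv_map_enum h rest (n + 1) (by omega)]
      rfl

-- B's triple zip (ids, shifted starts, cumulative ends) is exactly pvPairs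
theorem pv_zip_pairs : ∀ (cs segs : List String) (e : Int),
    cs.zip ((((e :: pvEnds segs e).dropLast).map (fun x => x - 250)).zip (pvEnds segs e))
      = pvPairs cs segs e
  | [], segs, e => by simp [pvPairs]
  | c :: cs, [], e => by simp [pvEnds, pvPairs]
  | c :: cs, seg :: segs, e => by
      simp only [pvEnds, pvPairs, List.dropLast_cons₂, List.map_cons, List.zip_cons_cons]
      rw [pv_zip_pairs cs segs (e + PySem.Str.len seg)]

-- A's accumulating loop: dict = foldl-insert over pvPairs, string = prev ++ join of segments
theorem pv_loop_eq (h : List (String × String)) :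
    ∀ (rest : List String) (d : PySem.Dict String (Int × Int)) (prev : String) (s n : Int),
      0 < n →
      (pvALoop h (PySem.List.enumerate rest n) (d, prev, s, PySem.Str.len prev)).1
        = (pvPairs rest (rest.map (pvSeg h)) (PySem.Str.len prev)).foldl
            (fun d p => PySem.Dict.insert d p.1 p.2) d ∧
      (pvALoop h (PySem.List.enumerate rest n) (d, prev, s, PySem.Str.len prev)).2.1
        = prev ++ PySem.Str.join "" (rest.map (pvSeg h))
  | [], d, prev, s, n, hn => by
      simp [PySem.List.enumerate, pvALoop, pvPairs, pv_join_nil]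
  | c :: rest, d, prev, s, n, hn => by
      rw [PySem.List.enumerate_cons]
      have hne : (n == 0) = false := by simp; omega
      have hlen := PySem.Str.len_append prev (pvSeg h c)
      simp only [pvALoop, pvPairs, hne, Bool.false_eq_true, if_false, List.map_cons,
        List.foldl_cons]
      rw [pv_join_cons, ← String.append_assoc]
      have ih := pv_loop_eq h rest
        (PySem.Dict.insert d c (PySem.Str.len prev - 250, PySem.Str.len (prev ++ pvSeg h c)))
        (prev ++ pvSeg h c) (PySem.Str.len prev - 250) (n + 1) (by omega)
      simp only [PySem.Str.len_append] at ih ⊢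
      exact ih

-- ===== VERDICT (by name: the statement is the Claim_ definition above) =====
theorem generate_sequence_spec : Claim_equal_generate_sequence := by
  intro ids head_to_seq _hdom hpre
  unfold Spec_generate_sequence
  obtain ⟨hne, hall⟩ := hpre
  match ids with
  | [] => exact absurd rfl hne
  | id0 :: rest =>
    unfold generate_sequence generate_sequence_alt
    have hlk0 := hall id0 (List.mem_cons_self ..)
    cases hlk : pvLookup head_to_seq id0 with
    | none => rw [pvLookup] at hlk; rw [hlk] at hlk0; simp at hlk0
    | some seg0 =>
      have hget : ((PySem.Dict.mk head_to_seq).get? id0) = some seg0 := hlk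
      simp only [hlk, PySem.List.enumerate_cons, pvALoop, BEq.rfl, if_true, hget,
        List.map_cons, Option.getD_some, pvEnds, zero_add, List.zip_cons_cons,
        List.foldl_cons]
      rw [pv_map_enum head_to_seq rest 1 (by omega), pv_zip_pairs, pv_join_cons]
      have hmain := pv_loop_eq head_to_seq rest
        (PySem.Dict.insert (PySem.Dict.mk []) id0 (0, PySem.Str.len seg0))
        seg0 0 1 (by omega)
      exact Prod.ext (congrArg PySem.Dict.items hmain.1) hmain.2
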